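-- pv_equiv track=rewrite | github.com/krishan001/Undead-AI-Solver | UndeadAI.py | countVis
-- ===== SOURCE A (Python) =====
-- def countVis(path):
--     # Given a path, figure out how many monsters you can see
--     pastMirror = False
--     numVis = 0
--     for x in path:
--         if x == '/' or x == '\\':
--             pastMirror = True
--         if pastMirror == False and (x == 'v' or x == 'z'):
--             numVis += 1
--         if pastMirror == True and (x == 'g' or x == 'z'):
--             numVis += 1
--
--     return numVis
-- ===== SOURCE B (Python) =====
-- def countVis(path):
--     # Split the path at the first mirror, then count each segment independently.
--     idx = next((i for i, c in enumerate(path) if c in '/\\'), len(path))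
--     return sum(1 for c in path[:idx] if c in 'vz') + sum(1 for c in path[idx:] if c in 'gz')
-- ===== Notes on version B (the rewrite author's own statement) =====
-- stated objective: simpler
-- what changed: Replaces the stateful boolean-flag pass with finding the first mirror index and summing two independent segment counts.
import Mathlib
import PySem

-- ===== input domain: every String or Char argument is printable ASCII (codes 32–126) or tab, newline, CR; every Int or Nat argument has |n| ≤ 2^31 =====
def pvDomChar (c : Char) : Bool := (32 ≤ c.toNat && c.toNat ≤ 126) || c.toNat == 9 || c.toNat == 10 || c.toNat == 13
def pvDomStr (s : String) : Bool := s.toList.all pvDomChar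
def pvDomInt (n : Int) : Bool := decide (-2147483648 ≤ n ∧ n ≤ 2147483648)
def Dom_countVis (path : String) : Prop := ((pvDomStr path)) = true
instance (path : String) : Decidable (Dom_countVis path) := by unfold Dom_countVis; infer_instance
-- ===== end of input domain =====

-- B replaces A's stateful boolean-flag pass by finding the first mirror index and
-- summing two independent segment counts (simpler decomposition; same O(n) cost).

-- ===== PORT A =====
-- the loop body of A: updates (pastMirror, numVis) for one character
def countVisStep (s : Bool × Int) (x : Char) : Bool × Int :=
  let pastMirror := if x = '/' ∨ x = '\\' then true else s.1
  let n1 := if pastMirror = false ∧ (x = 'v' ∨ x = 'z') then s.2 + 1 else s.2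
  let n2 := if pastMirror = true ∧ (x = 'g' ∨ x = 'z') then n1 + 1 else n1
  (pastMirror, n2)

def countVis (path : String) : Int :=
  (path.toList.foldl countVisStep (false, 0)).2

-- ===== PORT B =====
def countVis_alt (path : String) : Int :=
  let l := path.toList
  -- next((i for i, c in enumerate(path) if c in '/\\'), len(path))
  let idx := l.findIdx (fun c => c == '/' || c == '\\')
  ((l.take idx).countP (fun c => c == 'v' || c == 'z') : Int)
    + ((l.drop idx).countP (fun c => c == 'g' || c == 'z') : Int)

-- ===== PRECONDITION & SPEC =====
def Spec_countVis (path : String) (out : Int) : Prop := out = countVis_alt path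
instance (path : String) (out : Int) : Decidable (Spec_countVis path out) := by unfold Spec_countVis; infer_instance

-- ===== CLAIM (what is proved, stated in full; the proofs are below) =====
def Claim_equal_countVis : Prop := ∀ (path : String), Dom_countVis path → Spec_countVis path (countVis path)

-- ===== LEMMAS AND PROOFS =====

-- after the first mirror, A just counts 'g'/'z' in the rest
theorem countVis_fold_true (l : List Char) (n : Int) :
    (l.foldl countVisStep (true, n)).2
      = n + ((l.countP (fun c => c == 'g' || c == 'z') : Nat) : Int) := by
  induction l generalizing n with
  | nil => simp
  | cons x xs ih =>
    simp only [List.foldl_cons, List.countP_cons]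
    rw [show countVisStep (true, n) x
          = (true, if x = 'g' ∨ x = 'z' then n + 1 else n) by
        simp only [countVisStep]
        split_ifs <;> simp_all]
    rw [ih]
    by_cases h : x = 'g' ∨ x = 'z'
    · have hxb : (x == 'g' || x == 'z') = true := by rcases h with h | h <;> simp [h]
      simp [hxb, if_pos h]; ring
    · have hxb : (x == 'g' || x == 'z') = false := by
        push Not at h
        obtain ⟨h1, h2⟩ := h
        simp [h1, h2]
      simp [hxb, if_neg h]

-- before the first mirror, A counts 'v'/'z' up to the first mirror and 'g'/'z' after it
theorem countVis_fold_false (l : List Char) (n : Int) :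
    (l.foldl countVisStep (false, n)).2
      = n + (((l.takeWhile (fun c => !(c == '/' || c == '\\'))).countP
                (fun c => c == 'v' || c == 'z') : Nat) : Int)
          + (((l.dropWhile (fun c => !(c == '/' || c == '\\'))).countP
                (fun c => c == 'g' || c == 'z') : Nat) : Int) := by
  induction l generalizing n with
  | nil => simp
  | cons x xs ih =>
    by_cases hm : x = '/' ∨ x = '\\'
    · have hpb : (x == '/' || x == '\\') = true := by
        rcases hm with h | h <;> simp [h]
      have hstep : countVisStep (false, n) x = (true, n) := by
        rcases hm with h | h <;> simp [countVisStep, h]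
      simp only [List.foldl_cons, hstep, List.takeWhile_cons, List.dropWhile_cons, hpb]
      simp only [Bool.not_true, if_neg (by simp : ¬ (false = true))]
      rw [countVis_fold_true]
      have hx : (x == 'g' || x == 'z') = false := by
        rcases hm with h | h <;> simp [h]
      simp [hx]
    · have hpb : (x == '/' || x == '\\') = false := by
        push Not at hm; simp [hm.1, hm.2]
      have hstep : countVisStep (false, n) x
          = (false, if x = 'v' ∨ x = 'z' then n + 1 else n) := by
        simp only [countVisStep, if_neg hm]
        split_ifs <;> simp_all
      simp only [List.foldl_cons, hstep, List.takeWhile_cons, List.dropWhile_cons, hpb]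
      simp only [Bool.not_false]
      rw [ih]
      by_cases hv : x = 'v' ∨ x = 'z'
      · have hxb : (x == 'v' || x == 'z') = true := by rcases hv with h | h <;> simp [h]
        simp [hv, hxb]; ring
      · have hxb : (x == 'v' || x == 'z') = false := by
          push Not at hv; simp [hv.1, hv.2]
        simp [hv, hxb]

-- B's first-mirror index splits the list exactly at the takeWhile/dropWhile boundary
theorem take_findIdx_eq_takeWhile (p : Char → Bool) (l : List Char) :
    l.take (l.findIdx p) = l.takeWhile (fun c => !(p c)) := by
  induction l with
  | nil => simp
  | cons x xs ih =>
    by_cases h : p x <;> simp [List.findIdx_cons, h, ih]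

theorem drop_findIdx_eq_dropWhile (p : Char → Bool) (l : List Char) :
    l.drop (l.findIdx p) = l.dropWhile (fun c => !(p c)) := by
  induction l with
  | nil => simp
  | cons x xs ih =>
    by_cases h : p x <;> simp [List.findIdx_cons, h, ih]

-- ===== VERDICT (by name: the statement is the Claim_ definition above) =====
theorem countVis_spec : Claim_equal_countVis := by
  intro path _
  unfold Spec_countVis countVis countVis_alt
  dsimp only
  rw [countVis_fold_false, take_findIdx_eq_takeWhile, drop_findIdx_eq_dropWhile]
  ring
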